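-- pv_equiv track=rewrite | github.com/Frosselet/pdf-ocr | src/docpact/heuristics.py | build_column_names_from_headers
-- ===== SOURCE A (Python) =====
-- def build_column_names_from_headers(header_rows: list[list[str]]) -> list[str]:
--     """Build column names by stacking header rows vertically.
--
--     For multi-row headers, concatenates values from each row with spaces.
--     Deduplicates consecutive identical words.
--     """
--     if not header_rows:
--         return []
--
--     num_cols = max(len(row) for row in header_rows)
--     col_fragments: list[list[str]] = [[] for _ in range(num_cols)]
--
--     for row in header_rows:
--         for ci, cell in enumerate(row):
--             if ci < num_cols:
--                 text = cell.strip() if isinstance(cell, str) else str(cell).strip()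
--                 if text:
--                     col_fragments[ci].append(text)
--
--     # Build final column names: fragment-level dedup + ` / ` join
--     # This produces compound headers like "Group / Metric" that match
--     # the DOCX extractor's ` / ` separator convention.
--     column_names = []
--     for fragments in col_fragments:
--         deduped: list[str] = []
--         for fragment in fragments:
--             f = fragment.strip()
--             if f and (not deduped or f != deduped[-1]):
--                 deduped.append(f)
--         column_names.append(" / ".join(deduped))
--
--     return column_names
-- ===== SOURCE B (Python) =====
-- def build_column_names_from_headers(header_rows: list[list[str]]) -> list[str]:
--     """Build column names by stacking header rows vertically (column-major single pass)."""
--     if not header_rows: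
--         return []
--     num_cols = max(len(row) for row in header_rows)
--     column_names = []
--     for ci in range(num_cols):
--         deduped: list[str] = []
--         for row in header_rows:
--             if ci < len(row):
--                 t = row[ci].strip() if isinstance(row[ci], str) else str(row[ci]).strip()
--                 if t and (not deduped or t != deduped[-1]):
--                     deduped.append(t)
--         column_names.append(" / ".join(deduped))
--     return column_names
-- ===== Notes on version B (the rewrite author's own statement) =====
-- stated objective: simpler
-- what changed: Replaces A's two row-major passes (build a per-column fragment table, then a second dedup pass over each fragment list) with one column-major loop that dedups on the fly, eliminating the intermediate col_fragments table.
import Mathlib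
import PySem

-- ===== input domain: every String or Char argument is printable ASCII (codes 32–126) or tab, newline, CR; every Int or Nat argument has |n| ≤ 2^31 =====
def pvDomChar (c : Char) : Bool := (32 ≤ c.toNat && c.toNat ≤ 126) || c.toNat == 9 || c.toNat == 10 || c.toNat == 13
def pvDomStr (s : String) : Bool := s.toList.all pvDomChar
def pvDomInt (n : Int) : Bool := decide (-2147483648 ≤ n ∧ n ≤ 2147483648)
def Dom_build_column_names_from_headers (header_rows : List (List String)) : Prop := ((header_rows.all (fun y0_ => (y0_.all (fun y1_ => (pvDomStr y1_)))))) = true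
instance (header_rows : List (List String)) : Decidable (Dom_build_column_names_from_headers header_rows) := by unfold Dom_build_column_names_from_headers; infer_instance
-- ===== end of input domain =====

-- B replaces A's two row-major passes (fragment table + per-column dedup pass) with one
-- column-major loop that dedups on the fly; same asymptotic cost, simpler decomposition.


-- ===== PORT A =====
-- inner loop: 'for ci, cell in enumerate(row): if ci < num_cols: text = cell.strip(); if text: col_fragments[ci].append(text)'
def pvAInner (num_cols : Nat) : Nat → List String → List (List String) → List (List String)
  | _, [], cf => cf
  | ci, cell :: rest, cf =>
    let cf' := if ci < num_cols then
        let text := PySem.Str.strip cell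
        if text = "" then cf else cf.set ci ((cf.getD ci []) ++ [text])
      else cf
    pvAInner num_cols (ci + 1) rest cf'

-- 'for fragment in fragments: f = fragment.strip(); if f and (not deduped or f != deduped[-1]): deduped.append(f)'
def pvADedup (fragments : List String) : List String :=
  fragments.foldl (fun deduped fragment =>
    let f := PySem.Str.strip fragment
    if f ≠ "" ∧ (deduped = [] ∨ deduped.getLastD "" ≠ f) then deduped ++ [f] else deduped) []

def build_column_names_from_headers (header_rows : List (List String)) : List String :=
  if header_rows = [] then []
  else
    let num_cols := ((header_rows.map List.length).max?).getD 0
    let col_fragments := header_rows.foldl (fun cf row => pvAInner num_cols 0 row cf) (List.replicate num_cols [])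
    col_fragments.foldl (fun column_names fragments =>
      column_names ++ [PySem.Str.join " / " (pvADedup fragments)]) []

-- ===== PORT B =====
-- body of B's inner 'for row in header_rows' loop at column ci
def pvBStep (ci : Nat) (deduped : List String) (row : List String) : List String :=
  match row[ci]? with
  | none => deduped
  | some cell =>
    let t := PySem.Str.strip cell
    if t ≠ "" ∧ (deduped = [] ∨ deduped.getLastD "" ≠ t) then deduped ++ [t] else deduped

def build_column_names_from_headers_alt (header_rows : List (List String)) : List String :=
  if header_rows = [] then []
  else
    let num_cols := ((header_rows.map List.length).max?).getD 0
    (List.range num_cols).map (fun ci =>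
      PySem.Str.join " / " (header_rows.foldl (pvBStep ci) []))

-- ===== PRECONDITION & SPEC =====
def Spec_build_column_names_from_headers (header_rows : List (List String)) (out : List String) : Prop := out = build_column_names_from_headers_alt header_rows
instance (header_rows : List (List String)) (out : List String) : Decidable (Spec_build_column_names_from_headers header_rows out) := by unfold Spec_build_column_names_from_headers; infer_instance

-- ===== CLAIM (what is proved, stated in full; the proofs are below) =====
def Claim_equal_build_column_names_from_headers : Prop := ∀ (header_rows : List (List String)), Dom_build_column_names_from_headers header_rows → Spec_build_column_names_from_headers header_rows (build_column_names_from_headers header_rows)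

-- ===== LEMMAS AND PROOFS =====

-- the fragment row 'row' contributes to column ci, if any
def pvFragOf (ci : Nat) (row : List String) : Option String :=
  row[ci]?.bind (fun c => if PySem.Str.strip c = "" then none else some (PySem.Str.strip c))

-- all fragments of column ci, in row order (= A's col_fragments[ci])
def pvFragsAt (ci : Nat) (rows : List (List String)) : List String := rows.filterMap (pvFragOf ci)

-- contribution of the inner loop started at offset k to column ci
def pvFragContrib (ci k : Nat) (cells : List String) : List String :=
  if k ≤ ci then (pvFragOf (ci - k) cells).toList else []

-- dedup step on already-stripped fragments
def pvStepD (deduped : List String) (t : String) : List String :=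
  if t ≠ "" ∧ (deduped = [] ∨ deduped.getLastD "" ≠ t) then deduped ++ [t] else deduped

theorem pv_strip_idem (s : String) : PySem.Str.strip (PySem.Str.strip s) = PySem.Str.strip s := by
  have key : ∀ (u : List Char), PySem.Chars.strip (PySem.Chars.strip u) = PySem.Chars.strip u := by
    intro u
    simp only [PySem.Chars.strip, PySem.Chars.lstrip, PySem.Chars.rstrip]
    set p := PySem.Chars.isspace
    set l := List.dropWhile p u with hl
    have hdl : List.dropWhile p l = l := by rw [hl, List.dropWhile_idempotent]
    set r := List.dropWhile p l.reverse with hr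
    have hpre : r.reverse <+: l := by
      have hsuf := List.dropWhile_suffix (l := l.reverse) p
      rw [← hr] at hsuf
      have := hsuf.reverse
      simpa using this
    have hhead : List.dropWhile p r.reverse = r.reverse := by
      obtain ⟨t, ht⟩ := hpre
      cases hrv : r.reverse with
      | nil => simp
      | cons a as =>
        have hla : l = a :: (as ++ t) := by rw [← ht, hrv]; simp
        have hpa : p a = false := by
          have hthis := hdl
          rw [hla] at hthis
          by_contra hpa
          simp [eq_true_of_ne_false hpa] at hthis
          have hlen' := List.length_dropWhile_le p (as ++ t)
          have := congrArg List.length hthis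
          simp at this hlen'; omega
        simp [hpa]
    rw [hhead, List.reverse_reverse, hr, List.dropWhile_idempotent]
  rw [show PySem.Str.strip (PySem.Str.strip s) = String.ofList (PySem.Chars.strip (PySem.Str.strip s).toList) from rfl,
      PySem.Str.toList_strip, key]
  rfl

theorem pvAInner_length (n : Nat) (cells : List String) (k : Nat) (cf : List (List String)) :
    (pvAInner n k cells cf).length = cf.length := by
  induction cells generalizing k cf with
  | nil => rfl
  | cons c cs ih =>
    simp only [pvAInner]
    rw [ih]
    split_ifs <;> simp

theorem pvAInner_getD (n ci : Nat) (hci : ci < n) (cells : List String) :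
    ∀ (k : Nat) (cf : List (List String)), cf.length = n →
    (pvAInner n k cells cf).getD ci [] = cf.getD ci [] ++ pvFragContrib ci k cells := by
  induction cells with
  | nil => intro k cf _; simp [pvAInner, pvFragContrib, pvFragOf]
  | cons c cs ih =>
    intro k cf hlen
    simp only [pvAInner]
    by_cases hk : k < n
    · simp only [if_pos hk]
      by_cases hc : PySem.Str.strip c = ""
      · rw [if_pos hc, ih (k + 1) cf hlen]
        congr 1
        rcases Nat.lt_trichotomy k ci with h | h | h
        · have h1 : k ≤ ci := le_of_lt h
          have h2 : k + 1 ≤ ci := h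
          simp only [pvFragContrib, if_pos h1, if_pos h2]
          have : ci - k = (ci - (k + 1)) + 1 := by omega
          rw [this]
          simp [pvFragOf]
        · subst h
          simp [pvFragContrib, pvFragOf, hc]
        · have h1 : ¬ k ≤ ci := by omega
          have h2 : ¬ k + 1 ≤ ci := by omega
          simp [pvFragContrib, h1, h2]
      · rw [if_neg hc]
        have hlen' : (cf.set k ((cf.getD k []) ++ [PySem.Str.strip c])).length = n := by
          rw [List.length_set]; exact hlen
        rw [ih (k + 1) _ hlen']
        rcases Nat.lt_trichotomy k ci with h | h | h
        · have hset : (cf.set k ((cf.getD k []) ++ [PySem.Str.strip c])).getD ci [] = cf.getD ci [] := by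
            rw [List.getD, List.getD, List.getElem?_set_ne (by omega)]
            rfl
          rw [hset]
          congr 1
          have h1 : k ≤ ci := le_of_lt h
          have h2 : k + 1 ≤ ci := h
          simp only [pvFragContrib, if_pos h1, if_pos h2]
          have : ci - k = (ci - (k + 1)) + 1 := by omega
          rw [this]
          simp [pvFragOf]
        · subst h
          have hset : (cf.set k ((cf.getD k []) ++ [PySem.Str.strip c])).getD k [] = cf.getD k [] ++ [PySem.Str.strip c] := by
            rw [List.getD, List.getElem?_set_self (by omega), Option.getD_some]
          rw [hset]
          have h2 : ¬ k + 1 ≤ k := by omega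
          simp [pvFragContrib, pvFragOf, hc, h2]
        · have hset : (cf.set k ((cf.getD k []) ++ [PySem.Str.strip c])).getD ci [] = cf.getD ci [] := by
            rw [List.getD, List.getD, List.getElem?_set_ne (by omega)]
            rfl
          rw [hset]
          have h1 : ¬ k ≤ ci := by omega
          have h2 : ¬ k + 1 ≤ ci := by omega
          simp [pvFragContrib, h1, h2]
    · simp only [if_neg hk]
      rw [ih (k + 1) cf hlen]
      have h1 : ¬ k ≤ ci := by omega
      have h2 : ¬ k + 1 ≤ ci := by omega
      simp [pvFragContrib, h1, h2]

theorem pv_tableA_getD (n ci : Nat) (hci : ci < n) (rows : List (List String)) :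
    ∀ (cf : List (List String)), cf.length = n →
    (rows.foldl (fun cf row => pvAInner n 0 row cf) cf).getD ci [] = cf.getD ci [] ++ pvFragsAt ci rows := by
  induction rows with
  | nil => intro cf _; simp [pvFragsAt]
  | cons r rs ih =>
    intro cf hlen
    rw [List.foldl_cons, ih _ (by rw [pvAInner_length]; exact hlen),
        pvAInner_getD n ci hci r 0 cf hlen]
    have : pvFragContrib ci 0 r = (pvFragOf ci r).toList := by
      simp [pvFragContrib]
    rw [this, List.append_assoc]
    congr 1
    cases hr : pvFragOf ci r <;> simp [pvFragsAt, hr]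

theorem pv_tableA_length (n : Nat) (rows : List (List String)) (cf : List (List String)) :
    (rows.foldl (fun cf row => pvAInner n 0 row cf) cf).length = cf.length := by
  induction rows generalizing cf with
  | nil => rfl
  | cons r rs ih =>
    rw [List.foldl_cons, ih, pvAInner_length]

theorem pv_foldB_eq (ci : Nat) (rows : List (List String)) :
    ∀ (ded : List String), rows.foldl (pvBStep ci) ded = (pvFragsAt ci rows).foldl pvStepD ded := by
  induction rows with
  | nil => intro ded; rfl
  | cons r rs ih =>
    intro ded
    rw [List.foldl_cons, ih]
    have hrhs : pvFragsAt ci (r :: rs) = (pvFragOf ci r).toList ++ pvFragsAt ci rs := by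
      cases hr : pvFragOf ci r <;> simp [pvFragsAt, hr]
    have hstep : (pvFragOf ci r).toList.foldl pvStepD ded = pvBStep ci ded r := by
      simp only [pvBStep, pvFragOf]
      cases hg : r[ci]? with
      | none => simp
      | some cell =>
        by_cases hc : PySem.Str.strip cell = "" <;> simp [hc, pvStepD]
    rw [hrhs, List.foldl_append, hstep]

theorem pv_dedup_eq (ci : Nat) (rows : List (List String)) :
    pvADedup (pvFragsAt ci rows) = rows.foldl (pvBStep ci) [] := by
  rw [pv_foldB_eq]
  unfold pvADedup
  apply PySem.List.foldl_congr_mem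
  intro acc f hf
  obtain ⟨row, -, hrow⟩ := List.mem_filterMap.mp hf
  have hid : PySem.Str.strip f = f := by
    simp only [pvFragOf, Option.bind_eq_some_iff] at hrow
    obtain ⟨cell, -, hcell⟩ := hrow
    by_cases h : PySem.Str.strip cell = ""
    · rw [if_pos h] at hcell; cases hcell
    · rw [if_neg h] at hcell
      rw [← Option.some_inj.mp hcell, pv_strip_idem]
  simp only [hid, pvStepD]

-- ===== VERDICT (by name: the statement is the Claim_ definition above) =====
theorem build_column_names_from_headers_spec : Claim_equal_build_column_names_from_headers := by
  intro header_rows _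
  unfold Spec_build_column_names_from_headers build_column_names_from_headers build_column_names_from_headers_alt
  by_cases hnil : header_rows = []
  · simp [hnil]
  · rw [if_neg hnil, if_neg hnil]
    simp only [PySem.List.foldl_append_singleton_eq_map, List.nil_append]
    generalize (List.map List.length header_rows).max?.getD 0 = n
    have hlen : (List.foldl (fun cf row => pvAInner n 0 row cf) (List.replicate n []) header_rows).length = n := by
      rw [pv_tableA_length]; simp
    apply List.ext_getElem
    · simp [hlen]
    · intro i h1 h2
      simp only [List.getElem_map, List.getElem_range]
      have h1' : i < (List.foldl (fun cf row => pvAInner n 0 row cf) (List.replicate n []) header_rows).length := by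
        simpa using h1
      have hci : i < n := by rw [← hlen]; exact h1'
      have hgi : (List.foldl (fun cf row => pvAInner n 0 row cf) (List.replicate n []) header_rows)[i]'h1' = (List.foldl (fun cf row => pvAInner n 0 row cf) (List.replicate n []) header_rows).getD i [] := by
        rw [List.getD, List.getElem?_eq_getElem h1']
        rfl
      have hrep : (List.replicate n ([] : List String)).getD i [] = [] := by
        rw [List.getD, List.getElem?_replicate]
        split <;> rfl
      rw [hgi, pv_tableA_getD n i hci _ _ (by simp), hrep, List.nil_append, pv_dedup_eq]
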